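-- pv_equiv track=rewrite | github.com/HavinChung/English_Learning_Chatbot | vocab_handler.py | extract_best_entry
-- ===== SOURCE A (Python) =====
-- def extract_best_entry(entries):
--     if not entries:
--         return None
--
--     priority = ["noun", "verb", "adjective", "adverb"]
--
--     for pos_type in priority:
--         for entry in entries:
--             pos = (entry.get("part_of_speech") or "").lower()
--             if pos == pos_type:
--                 return entry
--
--     return entries[0]
-- ===== SOURCE B (Python) =====
-- def extract_best_entry(entries):
--     if not entries:
--         return None
--
--     priority = ["noun", "verb", "adjective", "adverb"]
--
--     def rank(entry):
--         pos = (entry.get("part_of_speech") or "").lower()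
--         return priority.index(pos) if pos in priority else len(priority)
--
--     return min(entries, key=rank)
-- ===== Notes on version B (the rewrite author's own statement) =====
-- stated objective: simpler
-- what changed: Replaces the nested loop (for each priority value, rescan all entries) by a single pass: each entry gets a numeric rank (its index in the priority list, or the sentinel len(priority)), and B returns min(entries, key=rank), whose leftmost-minimum tie-breaking reproduces A's first-match-per-priority behaviour and the entries[0] fallback.
import Mathlib
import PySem

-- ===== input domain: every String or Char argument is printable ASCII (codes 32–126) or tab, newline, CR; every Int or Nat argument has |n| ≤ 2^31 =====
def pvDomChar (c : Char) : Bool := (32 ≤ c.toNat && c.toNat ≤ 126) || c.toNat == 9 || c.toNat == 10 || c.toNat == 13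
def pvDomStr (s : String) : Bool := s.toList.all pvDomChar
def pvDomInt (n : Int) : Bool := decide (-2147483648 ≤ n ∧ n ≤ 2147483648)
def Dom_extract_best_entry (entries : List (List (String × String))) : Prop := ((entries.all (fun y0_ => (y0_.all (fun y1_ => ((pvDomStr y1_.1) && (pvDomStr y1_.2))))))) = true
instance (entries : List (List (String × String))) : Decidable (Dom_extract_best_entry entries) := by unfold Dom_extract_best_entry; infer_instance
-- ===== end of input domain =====

-- B replaces A's nested loops (rescan entries once per priority value) by a single
-- leftmost-argmin pass over the entries keyed by a numeric priority rank (simpler).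

-- ===== PORT A =====

-- pos = (entry.get("part_of_speech") or "").lower()   (shared by both Pythons verbatim)
def pvPos (e : List (String × String)) : String :=
  PySem.Str.lower ((PySem.Dict.get? (PySem.Dict.mk e) "part_of_speech").getD "")

-- inner loop: "for entry in entries: if pos == pos_type: return entry"
def pvFindPos (posType : String) : List (List (String × String)) → Option (List (String × String))
  | [] => none
  | e :: t => if pvPos e == posType then some e else pvFindPos posType t

-- outer loop: "for pos_type in priority: …"
def pvOuter (ps : List String) (entries : List (List (String × String))) : Option (List (String × String)) :=
  match ps with
  | [] => none
  | p :: rest =>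
    match pvFindPos p entries with
    | some e => some e
    | none => pvOuter rest entries

def extract_best_entry (entries : List (List (String × String))) : Option (List (String × String)) :=
  match entries with
  | [] => none
  | e0 :: _ =>
    match pvOuter ["noun", "verb", "adjective", "adverb"] entries with
    | some e => some e
    | none => some e0          -- "return entries[0]"

-- ===== PORT B =====

-- rank(entry) = priority.index(pos) if pos in priority else len(priority)
def pvRank (e : List (String × String)) : Nat :=
  match PySem.List.index? ["noun", "verb", "adjective", "adverb"] (pvPos e) with
  | some i => i
  | none => 4

def extract_best_entry_alt (entries : List (List (String × String))) : Option (List (String × String)) :=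
  match entries with
  | [] => none
  | _ :: _ => PySem.List.min? entries pvRank    -- min(entries, key=rank)

-- ===== PRECONDITION & SPEC =====
def Spec_extract_best_entry (entries : List (List (String × String))) (out : Option (List (String × String))) : Prop := out = extract_best_entry_alt entries
instance (entries : List (List (String × String))) (out : Option (List (String × String))) : Decidable (Spec_extract_best_entry entries out) := by unfold Spec_extract_best_entry; infer_instance

-- ===== CLAIM (what is proved, stated in full; the proofs are below) =====
def Claim_equal_extract_best_entry : Prop := ∀ (entries : List (List (String × String))), Dom_extract_best_entry entries → Spec_extract_best_entry entries (extract_best_entry entries)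

-- ===== LEMMAS AND PROOFS =====

-- structural-recursion form of "leftmost argmin", the common middle ground
def pvSpecMin : List (List (String × String)) → Option (List (String × String))
  | [] => none
  | e :: t =>
    match pvSpecMin t with
    | none => some e
    | some m => if pvRank e ≤ pvRank m then some e else some m

-- minimum rank (4 on the empty list)
def pvK : List (List (String × String)) → Nat
  | [] => 4
  | e :: t => min (pvRank e) (pvK t)

theorem pvRank_spec (e : List (String × String)) :
    pvRank e = if pvPos e = "noun" then 0 else if pvPos e = "verb" then 1
      else if pvPos e = "adjective" then 2 else if pvPos e = "adverb" then 3 else 4 := by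
  unfold pvRank
  split_ifs with h1 h2 h3 h4
  · simp [PySem.List.index?, List.idxOf?_cons, h1]
  · simp [PySem.List.index?, List.idxOf?_cons, Ne.symm h1, h2]
  · simp [PySem.List.index?, List.idxOf?_cons, Ne.symm h1, Ne.symm h2, h3]
  · simp [PySem.List.index?, List.idxOf?_cons, Ne.symm h1, Ne.symm h2, Ne.symm h3, h4]
  · simp [PySem.List.index?, List.idxOf?_cons, List.idxOf?_nil, Ne.symm h1, Ne.symm h2, Ne.symm h3, Ne.symm h4]

theorem pvRank_le (e : List (String × String)) : pvRank e ≤ 4 := by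
  rw [pvRank_spec]; split_ifs <;> omega

theorem pvPred0 : (fun e => pvPos e == "noun") = (fun e => pvRank e == 0) := by
  funext e; rw [pvRank_spec]; split_ifs <;> simp_all

theorem pvPred1 : (fun e => pvPos e == "verb") = (fun e => pvRank e == 1) := by
  funext e; rw [pvRank_spec]; split_ifs <;> simp_all

theorem pvPred2 : (fun e => pvPos e == "adjective") = (fun e => pvRank e == 2) := by
  funext e; rw [pvRank_spec]; split_ifs <;> simp_all

theorem pvPred3 : (fun e => pvPos e == "adverb") = (fun e => pvRank e == 3) := by
  funext e; rw [pvRank_spec]; split_ifs <;> simp_all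

theorem pvFindPos_eq (p : String) (l : List (List (String × String))) :
    pvFindPos p l = List.find? (fun e => pvPos e == p) l := by
  induction l with
  | nil => rfl
  | cons e t ih =>
    simp only [pvFindPos, List.find?_cons]
    cases hb : (pvPos e == p) <;> simp [hb, ih]

theorem pvK_le (l : List (List (String × String))) : pvK l ≤ 4 := by
  induction l with
  | nil => simp [pvK]
  | cons e t ih => simp only [pvK]; omega

theorem pvK_isMin (l : List (List (String × String))) : ∀ e ∈ l, pvK l ≤ pvRank e := by
  induction l with
  | nil => simp
  | cons a t ih =>
    intro e he
    rcases List.mem_cons.mp he with h | h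
    · subst h; simp [pvK]
    · have := ih e h; simp only [pvK]; omega

theorem pvSpecMin_eq_none (l : List (List (String × String))) : pvSpecMin l = none ↔ l = [] := by
  cases l with
  | nil => simp [pvSpecMin]
  | cons e t => simp only [pvSpecMin]; split <;> simp_all <;> split <;> simp

def pvStep (acc : Option (List (String × String))) (x : List (String × String)) :
    Option (List (String × String)) :=
  match acc with
  | none => some x
  | some m => if pvRank x < pvRank m then some x else some m

theorem pvSpecMin_cons (e : List (String × String)) (t : List (List (String × String))) :
    pvSpecMin (e :: t) =
      match pvSpecMin t with
      | none => some e
      | some m => if pvRank e ≤ pvRank m then some e else some m := rfl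

theorem pvSpecMin_rank (l : List (List (String × String))) :
    ∀ m, pvSpecMin l = some m → pvRank m = pvK l := by
  induction l with
  | nil => simp [pvSpecMin]
  | cons e t ih =>
    intro m hm
    rw [pvSpecMin_cons] at hm
    rcases ht : pvSpecMin t with _ | m'
    · rw [ht] at hm
      dsimp only at hm
      cases hm
      have h0 : t = [] := (pvSpecMin_eq_none t).mp ht
      subst h0
      have := pvRank_le e
      simp only [pvK]; omega
    · rw [ht] at hm
      dsimp only at hm
      have hr := ih m' ht
      by_cases h : pvRank e ≤ pvRank m'
      · rw [if_pos h] at hm; cases hm; simp only [pvK]; omega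
      · rw [if_neg h] at hm; cases hm; simp only [pvK]; omega

theorem pvSpecMin_find (l : List (List (String × String))) :
    pvSpecMin l = List.find? (fun e => pvRank e == pvK l) l := by
  induction l with
  | nil => rfl
  | cons e t ih =>
    rw [pvSpecMin_cons]
    by_cases h : pvRank e ≤ pvK t
    · have hk : pvK (e :: t) = pvRank e := by simp only [pvK]; omega
      have hp : (pvRank e == pvK (e :: t)) = true := by rw [hk]; simp
      rw [List.find?_cons]
      simp only [hp]
      rcases ht : pvSpecMin t with _ | m'
      · rfl
      · dsimp only
        have := pvSpecMin_rank t m' ht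
        rw [if_pos (by omega)]
    · have hne : t ≠ [] := by
        intro he; subst he
        have := pvRank_le e; simp [pvK] at h; omega
      rcases ht : pvSpecMin t with _ | m'
      · exact absurd ((pvSpecMin_eq_none t).mp ht) hne
      · dsimp only
        have hr := pvSpecMin_rank t m' ht
        have hk : pvK (e :: t) = pvK t := by simp only [pvK]; omega
        have hp : (pvRank e == pvK (e :: t)) = false := by
          rw [hk]; simp; omega
        rw [if_neg (by omega), List.find?_cons]
        simp only [hp]
        rw [hk, ← ih, ht]

theorem pvFold_spec (t : List (List (String × String))) :
    ∀ m, List.foldl pvStep (some m) t =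
      match pvSpecMin t with
      | none => some m
      | some m' => if pvRank m' < pvRank m then some m' else some m := by
  induction t with
  | nil => intro m; rfl
  | cons e t ih =>
    intro m
    rw [List.foldl_cons,
        show pvStep (some m) e = if pvRank e < pvRank m then some e else some m from rfl]
    by_cases h : pvRank e < pvRank m
    · rw [if_pos h, ih e, pvSpecMin_cons]
      rcases ht : pvSpecMin t with _ | m'
      · dsimp only
        rw [if_pos h]
      · dsimp only
        by_cases h2 : pvRank m' < pvRank e
        · rw [if_pos h2, if_neg (by omega)]
          dsimp only
          rw [if_pos (by omega)]
        · rw [if_neg h2, if_pos (by omega)]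
          dsimp only
          rw [if_pos h]
    · rw [if_neg h, ih m, pvSpecMin_cons]
      rcases ht : pvSpecMin t with _ | m'
      · dsimp only
        rw [if_neg h]
      · dsimp only
        by_cases h2 : pvRank m' < pvRank m
        · rw [if_pos h2, if_neg (by omega)]
          dsimp only
          rw [if_pos h2]
        · rw [if_neg h2]
          by_cases h4 : pvRank e ≤ pvRank m'
          · rw [if_pos h4]
            dsimp only
            rw [if_neg h]
          · rw [if_neg h4]
            dsimp only
            rw [if_neg h2]

theorem pvMin?_eq_specMin (e : List (String × String)) (t : List (List (String × String))) :
    PySem.List.min? (e :: t) pvRank = pvSpecMin (e :: t) := by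
  have h1 : PySem.List.min? (e :: t) pvRank = List.foldl pvStep (some e) t := by
    unfold PySem.List.min? pvStep
    simp only [List.foldl_cons]
    congr 1
    funext acc x
    cases acc <;> rfl
  rw [h1, pvFold_spec t e, pvSpecMin_cons]
  rcases ht : pvSpecMin t with _ | m'
  · rfl
  · dsimp only
    by_cases h : pvRank m' < pvRank e
    · rw [if_pos h, if_neg (by omega)]
    · rw [if_neg h, if_pos (by omega)]

theorem pvFind_none_of_lt (l : List (List (String × String))) (i : Nat) (hi : i < pvK l) :
    List.find? (fun e => pvRank e == i) l = none := by
  rw [List.find?_eq_none]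
  intro e he
  have := pvK_isMin l e he
  simp; omega

theorem pvA_eq_specMin (e0 : List (String × String)) (t : List (List (String × String))) :
    extract_best_entry (e0 :: t) = pvSpecMin (e0 :: t) := by
  set l := e0 :: t with hl
  have hfind := pvSpecMin_find l
  have hK := pvK_le l
  have hsome : ∃ m, pvSpecMin l = some m := by
    rcases h : pvSpecMin l with _ | m
    · exact absurd ((pvSpecMin_eq_none l).mp h) (by simp [hl])
    · exact ⟨m, rfl⟩
  rcases hsome with ⟨m, hm⟩
  show (match pvOuter ["noun", "verb", "adjective", "adverb"] l with
        | some e => some e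
        | none => some e0) = pvSpecMin l
  simp only [pvOuter, pvFindPos_eq, pvPred0, pvPred1, pvPred2, pvPred3]
  by_cases h0 : pvK l = 0
  · rw [h0] at hfind; rw [← hfind, hm]
  · rw [pvFind_none_of_lt l 0 (by omega)]
    by_cases h1 : pvK l = 1
    · rw [h1] at hfind; rw [← hfind, hm]
    · rw [pvFind_none_of_lt l 1 (by omega)]
      by_cases h2 : pvK l = 2
      · rw [h2] at hfind; rw [← hfind, hm]
      · rw [pvFind_none_of_lt l 2 (by omega)]
        by_cases h3 : pvK l = 3
        · rw [h3] at hfind; rw [← hfind, hm]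
        · rw [pvFind_none_of_lt l 3 (by omega)]
          have h4 : pvK l = 4 := by omega
          -- fallback entries[0]: every rank is 4 here, so the leftmost argmin is the head too
          have he0 : pvRank e0 = 4 := by
            have ha := pvK_isMin l e0 (by simp [hl])
            have hb := pvRank_le e0
            omega
          rw [h4] at hfind
          rw [hfind, hl, List.find?_cons]
          simp [he0]

-- ===== VERDICT (by name: the statement is the Claim_ definition above) =====
theorem extract_best_entry_spec : Claim_equal_extract_best_entry := by
  intro entries _
  unfold Spec_extract_best_entry
  cases entries with
  | nil => rfl
  | cons e0 t =>
    show extract_best_entry (e0 :: t) = extract_best_entry_alt (e0 :: t)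
    rw [pvA_eq_specMin,
        show extract_best_entry_alt (e0 :: t) = PySem.List.min? (e0 :: t) pvRank from rfl,
        pvMin?_eq_specMin]
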